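-- pv_equiv track=rewrite | github.com/guoziqingbupt/multi-keyword-fuzzy-search | Unigram.py | unigramGen
-- ===== SOURCE A (Python) =====
-- def unigramGen(word):
--     """return binary tuple form of uni-gram"""
--
--     aux = {}
--     result = []
--     for char in word:
--         if char not in aux:
--             aux[char] = 1
--         else:
--             aux[char] += 1
--         result.append((char, aux[char]))
--     return result
-- ===== SOURCE B (Python) =====
-- def unigramGen(word):
--     """return binary tuple form of uni-gram"""
--     chars = list(word)
--     out = [None] * len(chars)
--     for c in set(chars):
--         for k, i in enumerate(j for j, x in enumerate(chars) if x == c):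
--             out[i] = (c, k + 1)
--     return out
-- ===== Notes on version B (the rewrite author's own statement) =====
-- stated objective: alternative
-- what changed: Instead of one left-to-right pass with a running count per character, B groups positions by distinct character: for each char in set(word) it scatters (char, k+1) into a pre-sized output slot at the k-th position of that character, so the sequence is assembled out of per-character position groups rather than sequentially.
import Mathlib
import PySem

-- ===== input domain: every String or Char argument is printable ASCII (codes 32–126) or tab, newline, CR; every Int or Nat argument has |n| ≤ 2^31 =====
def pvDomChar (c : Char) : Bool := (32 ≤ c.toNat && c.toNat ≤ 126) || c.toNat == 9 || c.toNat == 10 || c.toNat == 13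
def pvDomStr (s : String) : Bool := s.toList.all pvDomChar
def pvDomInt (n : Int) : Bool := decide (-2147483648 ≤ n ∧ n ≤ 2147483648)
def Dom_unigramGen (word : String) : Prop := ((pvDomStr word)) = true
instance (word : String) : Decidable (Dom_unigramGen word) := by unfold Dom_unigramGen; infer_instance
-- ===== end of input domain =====

-- B replaces A's single running-count pass with a grouped scatter: for each distinct character it writes (char, k+1) into the k-th position of that character in a pre-sized output (alternative decomposition, same result).


-- ===== PORT A =====
-- for char in word: if char not in aux: aux[char] = 1 else: aux[char] += 1; result.append((char, aux[char]))
def unigramGenStepA (st : PySem.Dict String Int × List (String × Int)) (c : Char) :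
    PySem.Dict String Int × List (String × Int) :=
  let s := String.ofList [c]
  let aux := if st.1.contains s then st.1.insert s (st.1.getD s 0 + 1) else st.1.insert s 1
  (aux, st.2 ++ [(s, aux.getD s 0)])

def unigramGen (word : String) : List (String × Int) :=
  (word.toList.foldl unigramGenStepA (PySem.Dict.empty, [])).2

-- ===== PORT B =====
-- out = [None]*len(chars); for c in set(chars): for k, i in enumerate(j for j,x in enumerate(chars) if x==c): out[i] = (c, k+1)
-- placeholder ("", 0) stands for Python's None: every slot is overwritten before return (part of what the proof shows)
def unigramGen_alt (word : String) : List (String × Int) :=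
  let cs := word.toList
  let out : List (String × Int) := List.replicate cs.length ("", 0)
  (PySem.Set.ofList cs).foldl
    (fun o c =>
      let ps := ((PySem.List.enumerate cs).filter (fun q => q.2 == c)).map Prod.fst
      (PySem.List.enumerate ps).foldl
        (fun o2 q => o2.set q.2.toNat (String.ofList [c], q.1 + 1)) o)
    out

-- ===== PRECONDITION & SPEC =====
def Spec_unigramGen (word : String) (out : List (String × Int)) : Prop := out = unigramGen_alt word
instance (word : String) (out : List (String × Int)) : Decidable (Spec_unigramGen word out) := by unfold Spec_unigramGen; infer_instance

-- ===== CLAIM (what is proved, stated in full; the proofs are below) =====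
def Claim_equal_unigramGen : Prop := ∀ (word : String), Dom_unigramGen word → Spec_unigramGen word (unigramGen word)

-- ===== LEMMAS AND PROOFS =====

-- common specification: occurrence index of each char relative to a processed prefix p
def unigramGenSpecFun (p : List Char) : List Char → List (String × Int)
  | [] => []
  | c :: rs => (String.ofList [c], (p.count c : Int) + 1) :: unigramGenSpecFun (p ++ [c]) rs

theorem mkSingleton_injective : Function.Injective (fun c : Char => String.ofList [c]) := by
  intro a b h
  have := congrArg String.toList h
  simp at this
  exact this

-- the dict A has built after processing prefix p (branch collapsed: see stepA_eq)
def unigramGenDictOf (p : List Char) : PySem.Dict String Int :=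
  (p.map (fun c => String.ofList [c])).foldl (fun d s => d.insert s (d.getD s 0 + 1)) PySem.Dict.empty

theorem unigramGen_stepA_eq (d : PySem.Dict String Int) (acc : List (String × Int)) (c : Char) :
    unigramGenStepA (d, acc) c =
      (d.insert (String.ofList [c]) (d.getD (String.ofList [c]) 0 + 1),
       acc ++ [(String.ofList [c], d.getD (String.ofList [c]) 0 + 1)]) := by
  unfold unigramGenStepA
  by_cases h : d.contains (String.ofList [c])
  · simp [h, PySem.Dict.getD_insert_self]
  · simp [h, PySem.Dict.getD_insert_self, PySem.Dict.getD_of_not_contains _ _ (by simpa using h)]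

theorem unigramGen_dictOf_getD (p : List Char) (c : Char) :
    (unigramGenDictOf p).getD (String.ofList [c]) 0 = (p.count c : Int) := by
  unfold unigramGenDictOf
  rw [PySem.Dict.getD_foldl_insert_add_one]
  simp [List.count_map_of_injective _ _ mkSingleton_injective]

theorem unigramGen_dictOf_snoc (p : List Char) (c : Char) :
    (unigramGenDictOf p).insert (String.ofList [c]) ((unigramGenDictOf p).getD (String.ofList [c]) 0 + 1)
      = unigramGenDictOf (p ++ [c]) := by
  unfold unigramGenDictOf
  simp [List.foldl_append]

theorem unigramGen_loopA (rest : List Char) (p : List Char) (acc : List (String × Int)) :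
    rest.foldl unigramGenStepA (unigramGenDictOf p, acc)
      = (unigramGenDictOf (p ++ rest), acc ++ unigramGenSpecFun p rest) := by
  induction rest generalizing p acc with
  | nil => simp [unigramGenSpecFun]
  | cons c rs ih =>
      rw [List.foldl_cons, unigramGen_stepA_eq, unigramGen_dictOf_snoc, ih]
      simp [unigramGenSpecFun, unigramGen_dictOf_getD]

-- getElem? characterization of the common specification
theorem unigramGenSpecFun_length (p rest : List Char) :
    (unigramGenSpecFun p rest).length = rest.length := by
  induction rest generalizing p with
  | nil => simp [unigramGenSpecFun]
  | cons c rs ih => simp [unigramGenSpecFun, ih]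

theorem unigramGenSpecFun_getElem? (p rest : List Char) (i : Nat) (hi : i < rest.length) :
    (unigramGenSpecFun p rest)[i]? =
      some (String.ofList [rest[i]], ((p ++ rest.take i).count rest[i] : Int) + 1) := by
  induction rest generalizing p i with
  | nil => simp at hi
  | cons c rs ih =>
      cases i with
      | zero => simp [unigramGenSpecFun]
      | succ j =>
          have hj : j < rs.length := by simpa using hi
          simp [unigramGenSpecFun, ih (p ++ [c]) j hj]

-- B side: positions of c in cs with enumeration offset b
def unigramGenPos (cs : List Char) (b : Int) (c : Char) : List Int :=
  ((PySem.List.enumerate cs b).filter (fun q => q.2 == c)).map Prod.fst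

theorem unigramGenPos_cons (x : Char) (cs : List Char) (b : Int) (c : Char) :
    unigramGenPos (x :: cs) b c
      = (if x = c then [b] else []) ++ unigramGenPos cs (b + 1) c := by
  unfold unigramGenPos
  rw [PySem.List.enumerate_cons]
  by_cases h : x = c <;> simp [h]

-- B's inner loop: scatter the group of character c
theorem unigramGen_innerB (c : Char) (cs : List Char) (b k : Int) (hb : 0 ≤ b)
    (out : List (String × Int)) (hlen : b.toNat + cs.length ≤ out.length) (j : Nat) :
    ((PySem.List.enumerate (unigramGenPos cs b c) k).foldl
        (fun o2 q => o2.set q.2.toNat (String.ofList [c], q.1 + 1)) out)[j]?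
      = if b.toNat ≤ j ∧ j - b.toNat < cs.length ∧ cs[j - b.toNat]? = some c then
          some (String.ofList [c], k + ((cs.take (j - b.toNat)).count c : Int) + 1)
        else out[j]? := by
  induction cs generalizing b k out with
  | nil =>
      simp [unigramGenPos, PySem.List.enumerate_nil]
  | cons x rs ih =>
      rw [unigramGenPos_cons]
      by_cases hx : x = c
      · subst hx
        rw [if_pos rfl]
        rw [show ([b] ++ unigramGenPos rs (b + 1) x) = b :: unigramGenPos rs (b + 1) x by simp]
        rw [PySem.List.enumerate_cons, List.foldl_cons]
        have ih' := ih (b + 1) (k + 1) (by omega) (out.set b.toNat (String.ofList [x], k + 1)) (by simp at hlen ⊢; omega)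
        rw [ih']
        by_cases h1 : (b + 1).toNat ≤ j ∧ j - (b + 1).toNat < rs.length ∧ rs[j - (b + 1).toNat]? = some x
        · rw [if_pos h1]
          have hbj : b.toNat < j := by omega
          have hd : j - b.toNat = (j - (b+1).toNat) + 1 := by omega
          rw [if_pos ⟨by omega, by rw [hd]; simpa using h1.2.1, by rw [hd]; simpa using h1.2.2⟩]
          rw [hd]
          simp [List.take_succ_cons]
          ring
        · rw [if_neg h1]
          by_cases hj : j = b.toNat
          · subst hj
            rw [if_pos ⟨le_refl _, by simp, by simp⟩]
            rw [List.getElem?_set_self (by simp at hlen ⊢; omega)]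
            simp
          · rw [List.getElem?_set_ne (by omega)]
            rw [if_neg]
            intro ⟨ha, hbnd, hc⟩
            have hd : j - b.toNat = (j - (b+1).toNat) + 1 := by omega
            exact h1 ⟨by omega, by rw [hd] at hbnd; simpa using hbnd, by rw [hd] at hc; simpa using hc⟩
      · rw [if_neg hx, List.nil_append]
        rw [ih (b + 1) k (by omega) out (by simp at hlen ⊢; omega)]
        by_cases h1 : (b + 1).toNat ≤ j ∧ j - (b + 1).toNat < rs.length ∧ rs[j - (b + 1).toNat]? = some c
        · rw [if_pos h1]
          have hd : j - b.toNat = (j - (b+1).toNat) + 1 := by omega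
          rw [if_pos ⟨by omega, by rw [hd]; simpa using h1.2.1, by rw [hd]; simpa using h1.2.2⟩]
          rw [hd]
          simp [List.take_succ_cons, hx]
        · rw [if_neg h1, if_neg]
          intro ⟨ha, hbnd, hc⟩
          by_cases hj : j = b.toNat
          · subst hj
            simp at hbnd hc
            simp [hc] at hx
          · have hd : j - b.toNat = (j - (b+1).toNat) + 1 := by omega
            exact h1 ⟨by omega, by rw [hd] at hbnd; simpa using hbnd, by rw [hd] at hc; simpa using hc⟩

-- a set-scatter fold preserves length
theorem unigramGen_foldl_set_length {α : Type} (l : List (Int × Int)) (f : Int × Int → α)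
    (out : List α) :
    (l.foldl (fun o2 q => o2.set q.2.toNat (f q)) out).length = out.length := by
  induction l generalizing out with
  | nil => rfl
  | cons q qs ih => simp [List.foldl_cons, ih]

-- B's outer loop invariant: slots of already-processed characters hold the final value
theorem unigramGen_outerB (cs : List Char) (S : List Char) (out : List (String × Int))
    (hlen : cs.length ≤ out.length) (j : Nat) :
    ((S.foldl
        (fun o c =>
          (PySem.List.enumerate (unigramGenPos cs 0 c) 0).foldl
            (fun o2 q => o2.set q.2.toNat (String.ofList [c], q.1 + 1)) o) out))[j]?
      = if j < cs.length ∧ cs[j]?.any (fun c => c ∈ S) then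
          (cs[j]?.map (fun c => (String.ofList [c], ((cs.take j).count c : Int) + 1)))
        else out[j]? := by
  induction S generalizing out with
  | nil => simp
  | cons c S ih =>
      rw [List.foldl_cons,
        ih _ (by rw [unigramGen_foldl_set_length]; exact hlen)]
      have hin := unigramGen_innerB c cs 0 0 (le_refl 0) out (by simpa using hlen) j
      simp only [Int.toNat_zero, Nat.sub_zero, Nat.zero_le, true_and, zero_add] at hin
      by_cases hjl : j < cs.length
      · have hcj : cs[j]? = some cs[j] := List.getElem?_eq_getElem hjl
        rw [hcj] at hin ⊢
        by_cases hS : cs[j] ∈ S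
        · rw [if_pos ⟨hjl, by simp [hS]⟩, if_pos ⟨hjl, by simp [hS]⟩]
        · rw [if_neg (by simp [hS])]
          by_cases hcc : cs[j] = c
          · rw [hin, if_pos ⟨hjl, by rw [hcc]⟩, if_pos ⟨hjl, by simp [hcc]⟩]
            simp [hcc]
          · rw [hin, if_neg (by simp [hcc]),
              if_neg (by simp [List.mem_cons, hcc, hS])]
      · have h0 : cs[j]? = none := List.getElem?_eq_none (by omega)
        rw [h0] at hin ⊢
        simp only [Option.any_none, Bool.false_eq_true, and_false, if_false]
        rw [hin, if_neg (by rintro ⟨h, -⟩; omega)]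

-- ===== VERDICT (by name: the statement is the Claim_ definition above) =====
theorem unigramGen_spec : Claim_equal_unigramGen := by
  intro word _
  unfold Spec_unigramGen unigramGen unigramGen_alt
  have hA := unigramGen_loopA word.toList [] []
  simp only [unigramGenDictOf, List.map_nil, List.foldl_nil, List.nil_append] at hA
  rw [hA]
  show unigramGenSpecFun [] word.toList =
    (PySem.Set.ofList word.toList).foldl
      (fun o c =>
        (PySem.List.enumerate (unigramGenPos word.toList 0 c) 0).foldl
          (fun o2 q => o2.set q.2.toNat (String.ofList [c], q.1 + 1)) o)
      (List.replicate word.toList.length ("", 0))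
  apply List.ext_getElem?
  intro j
  rw [unigramGen_outerB word.toList (PySem.Set.ofList word.toList)
      (List.replicate word.toList.length ("", 0)) (by simp) j]
  by_cases hj : j < word.toList.length
  · have hcj : word.toList[j]? = some (word.toList[j]) := List.getElem?_eq_getElem hj
    rw [unigramGenSpecFun_getElem? [] _ j hj, hcj,
      if_pos ⟨hj, by simp [PySem.Set.mem_ofList]⟩]
    simp
  · rw [List.getElem?_eq_none (by rw [unigramGenSpecFun_length]; omega),
      if_neg (by rintro ⟨h, -⟩; exact hj h),
      List.getElem?_eq_none (by rw [List.length_replicate]; omega)]
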